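-- pv_equiv track=rewrite | github.com/gmcirco/blog | posts/uv-testing/prepare_batch.py | extract_unique_matches_as_string
-- ===== SOURCE A (Python) =====
-- def extract_unique_matches_as_string(results):
--     seen = set()
--     unique_matches = []
--
--     for entry in results:
--         for match in entry["matches"]:
--             if match not in seen:
--                 seen.add(match)
--                 unique_matches.append(match)
--
--     unique_matches.sort()
--
--     return "\n".join(unique_matches)
-- ===== SOURCE B (Python) =====
-- def extract_unique_matches_as_string(results):
--     all_matches = sorted(m for entry in results for m in entry["matches"])
--     out = []
--     prev = None
--     for m in all_matches:
--         if m != prev: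
--             out.append(m)
--             prev = m
--     return "\n".join(out)
-- ===== Notes on version B (the rewrite author's own statement) =====
-- stated objective: alternative
-- what changed: Instead of deduplicating with a seen-set while preserving first-occurrence order and sorting afterwards, B sorts ALL matches (duplicates included) first and then removes duplicates in a single linear scan by comparing each element with the previous one; no set is maintained at all. Pre_ excludes inputs where some entry lacks the 'matches' key, on which both A and B raise KeyError.
import Mathlib
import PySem

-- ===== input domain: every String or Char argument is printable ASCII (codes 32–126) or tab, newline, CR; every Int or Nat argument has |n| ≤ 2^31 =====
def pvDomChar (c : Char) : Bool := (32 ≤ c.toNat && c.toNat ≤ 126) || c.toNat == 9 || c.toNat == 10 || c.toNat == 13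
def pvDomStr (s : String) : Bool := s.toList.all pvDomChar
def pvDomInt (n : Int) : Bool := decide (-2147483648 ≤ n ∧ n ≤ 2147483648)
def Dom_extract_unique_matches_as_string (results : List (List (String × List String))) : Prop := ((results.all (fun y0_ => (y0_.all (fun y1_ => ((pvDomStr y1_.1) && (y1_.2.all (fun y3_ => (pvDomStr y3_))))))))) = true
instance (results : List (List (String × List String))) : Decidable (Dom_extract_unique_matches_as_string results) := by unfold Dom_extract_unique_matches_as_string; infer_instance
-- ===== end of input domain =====

-- B replaces A's seen-set/ordered-list dedup-then-sort with sort-all-then-adjacent-dedup scan; alternative, same cost.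

-- ===== PORT A =====
def extract_unique_matches_as_string (results : List (List (String × List String))) : String :=
  -- seen = set(); unique_matches = []; for entry … for match … if not in seen: add+append; sort; join
  let st := results.foldl
    (fun (st : PySem.Set String × List String) entry =>
      (PySem.Dict.getD (PySem.Dict.mk entry) "matches" []).foldl   -- entry["matches"]: Pre_ guarantees the key is present
        (fun st m => if st.1.contains m then st else (PySem.Set.add st.1 m, st.2 ++ [m])) st)
    (PySem.Set.empty, [])
  PySem.Str.join "\n" (PySem.List.sorted st.2 (fun x => x) false)

-- ===== PORT B =====
def extract_unique_matches_as_string_alt (results : List (List (String × List String))) : String :=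
  -- all_matches = sorted(m for entry in results for m in entry["matches"])
  let all_matches := PySem.List.sorted
    (results.flatMap (fun entry => PySem.Dict.getD (PySem.Dict.mk entry) "matches" []))
    (fun x => x) false
  -- out = []; prev = None; for m in all_matches: if m != prev: out.append(m); prev = m
  let st := all_matches.foldl
    (fun (st : List String × Option String) m =>
      if st.2 ≠ some m then (st.1 ++ [m], some m) else st)
    ([], none)
  PySem.Str.join "\n" st.1

-- ===== PRECONDITION & SPEC =====
-- Pre_ excludes exactly the inputs where entry["matches"] raises KeyError in Python (both A and B raise there).
def Pre_extract_unique_matches_as_string (results : List (List (String × List String))) : Prop :=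
  ∀ entry ∈ results, "matches" ∈ entry.map Prod.fst
instance (results : List (List (String × List String))) : Decidable (Pre_extract_unique_matches_as_string results) := by unfold Pre_extract_unique_matches_as_string; infer_instance
def pvWitness_extract_unique_matches_as_string : (List (List (String × List String))) :=
  [[("matches", ["b", "a"])], [("matches", ["a", "c"]), ("other", [])]]

def Spec_extract_unique_matches_as_string (results : List (List (String × List String))) (out : String) : Prop := out = extract_unique_matches_as_string_alt results
instance (results : List (List (String × List String))) (out : String) : Decidable (Spec_extract_unique_matches_as_string results out) := by unfold Spec_extract_unique_matches_as_string; infer_instance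

-- ===== CLAIM (what is proved, stated in full; the proofs are below) =====
def Claim_equal_extract_unique_matches_as_string : Prop := ∀ (results : List (List (String × List String))), Dom_extract_unique_matches_as_string results → Pre_extract_unique_matches_as_string results → Spec_extract_unique_matches_as_string results (extract_unique_matches_as_string results)

-- ===== LEMMAS AND PROOFS =====

-- A's inner loop keeps seen and unique_matches equal: from a paired state (s, s) it is Set.add folded twice.
lemma pvInnerPair (xs : List String) (s : List String) :
    xs.foldl (fun (st : PySem.Set String × List String) m =>
        if st.1.contains m then st else (PySem.Set.add st.1 m, st.2 ++ [m])) (s, s)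
      = (xs.foldl PySem.Set.add s, xs.foldl PySem.Set.add s) := by
  induction xs generalizing s with
  | nil => rfl
  | cons m xs ih =>
    simp only [List.foldl_cons]
    by_cases h : PySem.Set.contains s m = true
    · rw [if_pos h, show PySem.Set.add s m = s from by simp only [PySem.Set.add]; rw [if_pos h]]
      exact ih s
    · rw [if_neg h, show PySem.Set.add s m = s ++ [m] from by simp only [PySem.Set.add]; rw [if_neg h]]
      exact ih (s ++ [m])

-- A's outer loop over entries is Set.add folded over the flattened matches.
lemma pvOuterPair (results : List (List (String × List String))) (s : List String) :
    results.foldl (fun (st : PySem.Set String × List String) entry =>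
        (PySem.Dict.getD (PySem.Dict.mk entry) "matches" []).foldl
          (fun st m => if st.1.contains m then st else (PySem.Set.add st.1 m, st.2 ++ [m])) st) (s, s)
      = ((results.flatMap (fun entry => PySem.Dict.getD (PySem.Dict.mk entry) "matches" [])).foldl PySem.Set.add s,
         (results.flatMap (fun entry => PySem.Dict.getD (PySem.Dict.mk entry) "matches" [])).foldl PySem.Set.add s) := by
  induction results generalizing s with
  | nil => rfl
  | cons e rs ih =>
    simp only [List.foldl_cons, List.flatMap_cons, List.foldl_append, pvInnerPair, ih]

-- recursive form of B's adjacent-dedup scan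
def pvChain (prev : Option String) : List String → List String
  | [] => []
  | m :: xs => if prev = some m then pvChain prev xs else m :: pvChain (some m) xs

-- B's loop produces out ++ pvChain prev xs in its first component.
lemma pvLoopEqChain (xs : List String) (out : List String) (prev : Option String) :
    (xs.foldl (fun (st : List String × Option String) m =>
        if st.2 ≠ some m then (st.1 ++ [m], some m) else st) (out, prev)).1
      = out ++ pvChain prev xs := by
  induction xs generalizing out prev with
  | nil => simp [pvChain]
  | cons m xs ih =>
    rw [List.foldl_cons]
    by_cases h : prev = some m
    · rw [if_neg (show ¬((out, prev).2 ≠ some m) from fun hc => hc h), ih, pvChain, if_pos h]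
    · rw [if_pos (show (out, prev).2 ≠ some m from h), ih, pvChain, if_neg h, List.append_assoc]
      rfl

-- on a ≤-sorted tail whose elements all dominate p, pvChain (some p) keeps exactly the elements ≠ p,
-- strictly increasing and all above p.
lemma pvChainSome (xs : List String) (p : String)
    (hs : xs.Pairwise (· ≤ ·)) (hp : ∀ y ∈ xs, p ≤ y) :
    (∀ x, x ∈ pvChain (some p) xs ↔ (x ∈ xs ∧ x ≠ p))
    ∧ (pvChain (some p) xs).Pairwise (· < ·)
    ∧ (∀ x ∈ pvChain (some p) xs, p < x) := by
  induction xs generalizing p with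
  | nil => simp [pvChain]
  | cons m xs ih =>
    rcases List.pairwise_cons.mp hs with ⟨hm, hs'⟩
    by_cases h : m = p
    · subst h
      rw [pvChain, if_pos rfl]
      have := ih m hs' hm
      refine ⟨fun x => ?_, this.2.1, this.2.2⟩
      rw [this.1 x, List.mem_cons]
      constructor
      · rintro ⟨hx, hne⟩; exact ⟨Or.inr hx, hne⟩
      · rintro ⟨rfl | hx, hne⟩
        · exact absurd rfl hne
        · exact ⟨hx, hne⟩
    · have hpm : p < m := lt_of_le_of_ne (hp m List.mem_cons_self) (Ne.symm h)
      rw [pvChain, if_neg (fun he => h (Option.some.inj he).symm)]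
      have := ih m hs' hm
      refine ⟨fun x => ?_, ?_, ?_⟩
      · rw [List.mem_cons, this.1 x, List.mem_cons]
        constructor
        · rintro (rfl | ⟨hx, _⟩)
          · exact ⟨Or.inl rfl, h⟩
          · exact ⟨Or.inr hx, (lt_of_lt_of_le hpm (hm x hx)).ne'⟩
        · rintro ⟨rfl | hx, hne⟩
          · exact Or.inl rfl
          · by_cases hxm : x = m
            · exact Or.inl hxm
            · exact Or.inr ⟨hx, hxm⟩
      · exact List.pairwise_cons.mpr ⟨fun x hx => this.2.2 x hx, this.2.1⟩
      · intro x hx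
        rcases List.mem_cons.mp hx with rfl | hx
        · exact hpm
        · exact lt_trans hpm (this.2.2 x hx)

-- pvChain none on a ≤-sorted list keeps every element and is strictly increasing.
lemma pvChainNone (xs : List String) (hs : xs.Pairwise (· ≤ ·)) :
    (∀ x, x ∈ pvChain none xs ↔ x ∈ xs) ∧ (pvChain none xs).Pairwise (· < ·) := by
  cases xs with
  | nil => simp [pvChain]
  | cons m xs =>
    rcases List.pairwise_cons.mp hs with ⟨hm, hs'⟩
    have := pvChainSome xs m hs' hm
    rw [pvChain, if_neg (by simp : ¬((none : Option String) = some m))]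
    refine ⟨fun x => ?_, List.pairwise_cons.mpr ⟨fun x hx => this.2.2 x hx, this.2.1⟩⟩
    rw [List.mem_cons, this.1 x, List.mem_cons]
    constructor
    · rintro (rfl | ⟨hx, _⟩)
      · exact Or.inl rfl
      · exact Or.inr hx
    · rintro (rfl | hx)
      · exact Or.inl rfl
      · by_cases hxm : x = m
        · exact Or.inl hxm
        · exact Or.inr ⟨hx, hxm⟩

-- the two result LISTS coincide: sorted(set(L)) = adjacent-dedup of sorted(L).
lemma pvListsEq (L : List String) :
    PySem.List.sorted (PySem.Set.ofList L) (fun x => x) false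
      = pvChain none (PySem.List.sorted L (fun x => x) false) := by
  have hsorted : (PySem.List.sorted L (fun x => x) false).Pairwise (· ≤ ·) :=
    PySem.List.sorted_pairwise L (fun x => x)
  have hc := pvChainNone _ hsorted
  apply PySem.List.sorted_eq_of_perm_of_pairwise_lt
  · rw [List.perm_ext_iff_of_nodup (hc.2.imp (fun h => ne_of_lt h)) (PySem.Set.nodup_ofList L)]
    intro x
    rw [hc.1 x, PySem.List.mem_sorted, PySem.Set.mem_ofList]
  · exact hc.2

-- ===== VERDICT (by name: the statement is the Claim_ definition above) =====
theorem extract_unique_matches_as_string_spec : Claim_equal_extract_unique_matches_as_string := by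
  intro results _ _
  show _ = _
  simp only [extract_unique_matches_as_string, extract_unique_matches_as_string_alt]
  rw [show ((PySem.Set.empty : PySem.Set String), ([] : List String))
        = ((PySem.Set.empty : PySem.Set String), (PySem.Set.empty : PySem.Set String)) from rfl,
    pvOuterPair, pvLoopEqChain, List.nil_append,
    show (results.flatMap fun entry => PySem.Dict.getD (PySem.Dict.mk entry) "matches" []).foldl
          PySem.Set.add PySem.Set.empty
        = PySem.Set.ofList (results.flatMap fun entry => PySem.Dict.getD (PySem.Dict.mk entry) "matches" [])
      from rfl,
    pvListsEq]
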